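-- pv_equiv track=rewrite | github.com/suyoung049/TIL | 2024_취업준비/코테/20240715~24/선물.py | gift_count
-- ===== SOURCE A (Python) =====
-- friends = ["a", "b", "c"]
--
-- def gift_count(gift_list, gift_pint):
--     gift_count = [0 for j in range(len(friends))]
--     for j in range(len(friends)):
--         for i in range(j+1, len(friends)):
--             if gift_list[j][i] > gift_list[i][j]:
--                 gift_count[j] += 1
--             elif gift_list[j][i] < gift_list[i][j]:
--                 gift_count[i] += 1
--             elif gift_list[j][i] == gift_list[i][j]:
--
--                 j_point = (gift_pint[j][0] - gift_pint[j][1])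
--                 i_point = (gift_pint[i][0] - gift_pint[i][1])
--
--                 if j_point > i_point:
--                     gift_count[j] += 1
--                 elif j_point < i_point:
--                     gift_count[i] += 1
--
--     return gift_count
-- ===== SOURCE B (Python) =====
-- friends = ["a", "b", "c"]
--
-- def gift_count(gift_list, gift_pint):
--     n = len(friends)
--     diff = [gift_pint[k][0] - gift_pint[k][1] for k in range(n)]
--     return [
--         sum(
--             1
--             for i in range(n)
--             if i != j
--             and (
--                 gift_list[j][i] > gift_list[i][j]
--                 or (gift_list[j][i] == gift_list[i][j] and diff[j] > diff[i])
--             )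
--         )
--         for j in range(n)
--     ]
-- ===== Notes on version B (the rewrite author's own statement) =====
-- stated objective: alternative
-- what changed: Replaces the upper-triangular pass that mutates a counter list at two indices per pair with a precomputed diff table plus a per-friend count of beaten opponents over the full index range (an antisymmetric 'beats' relation), built as a comprehension with no mutation.
-- outside the precondition, e.g. on gift_count([[0, 1, 1], [0, 0, 1], [0, 0, 0]], []): A returns [2, 1, 0], B raises IndexError
import Mathlib
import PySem

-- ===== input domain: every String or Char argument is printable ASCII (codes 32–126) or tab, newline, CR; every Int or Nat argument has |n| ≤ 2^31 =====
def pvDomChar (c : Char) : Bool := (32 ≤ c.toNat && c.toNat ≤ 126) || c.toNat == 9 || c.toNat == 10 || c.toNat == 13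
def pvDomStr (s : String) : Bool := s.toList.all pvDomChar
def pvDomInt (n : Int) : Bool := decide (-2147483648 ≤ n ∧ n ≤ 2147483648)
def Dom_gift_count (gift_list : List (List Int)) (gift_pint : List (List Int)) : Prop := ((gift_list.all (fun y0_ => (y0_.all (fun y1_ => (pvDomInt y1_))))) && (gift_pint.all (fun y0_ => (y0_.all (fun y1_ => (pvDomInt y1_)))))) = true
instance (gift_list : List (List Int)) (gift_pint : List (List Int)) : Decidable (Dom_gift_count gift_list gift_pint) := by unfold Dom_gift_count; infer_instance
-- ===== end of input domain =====

-- B replaces A's triangular mutating pass with a precomputed diff table and a per-friend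
-- count of beaten opponents (alternative decomposition, same cost; n is fixed at 3 by `friends`).

-- m[j][i] (Python indexing; Pre_ guarantees every accessed index is in range)
def pvAt (m : List (List Int)) (j i : Int) : Int :=
  PySem.List.pyGetD (PySem.List.pyGetD m j []) i 0

-- ===== PORT A =====
def gift_count (gift_list : List (List Int)) (gift_pint : List (List Int)) : List Int :=
  let init : List Int := (PySem.List.pyRange 0 3 1).map (fun _ => (0 : Int))
  (PySem.List.pyRange 0 3 1).foldl (fun acc j =>
    (PySem.List.pyRange (j + 1) 3 1).foldl (fun acc i =>
      if pvAt gift_list j i > pvAt gift_list i j then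
        PySem.List.pySetD acc j (PySem.List.pyGetD acc j 0 + 1)
      else if pvAt gift_list j i < pvAt gift_list i j then
        PySem.List.pySetD acc i (PySem.List.pyGetD acc i 0 + 1)
      else if pvAt gift_list j i = pvAt gift_list i j then
        let j_point := pvAt gift_pint j 0 - pvAt gift_pint j 1
        let i_point := pvAt gift_pint i 0 - pvAt gift_pint i 1
        if j_point > i_point then
          PySem.List.pySetD acc j (PySem.List.pyGetD acc j 0 + 1)
        else if j_point < i_point then
          PySem.List.pySetD acc i (PySem.List.pyGetD acc i 0 + 1)
        else acc
      else acc) acc) init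

-- ===== PORT B =====
def gift_count_alt (gift_list : List (List Int)) (gift_pint : List (List Int)) : List Int :=
  let diff : List Int :=
    (PySem.List.pyRange 0 3 1).map (fun k => pvAt gift_pint k 0 - pvAt gift_pint k 1)
  (PySem.List.pyRange 0 3 1).map (fun j =>
    (PySem.List.pyRange 0 3 1).foldl (fun s i =>
      if i ≠ j ∧ (pvAt gift_list j i > pvAt gift_list i j ∨
          (pvAt gift_list j i = pvAt gift_list i j ∧
            PySem.List.pyGetD diff j 0 > PySem.List.pyGetD diff i 0)) then s + 1 else s) 0)

-- ===== PRECONDITION & SPEC =====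
-- Pre_ requires exactly the list shape both programs index into: 3 rows of gifts (rows 0 and 1
-- of length ≥ 3, row 2 of length ≥ 2 — column 2 of row 2 is never read) and 3 gift_pint rows of
-- length ≥ 2.  It excludes some inputs A returns on: A reads gift_pint only when a pair ties, so
-- A returns on tie-free inputs with a short gift_pint, where B's unconditional diff table raises.
def Pre_gift_count (gift_list : List (List Int)) (gift_pint : List (List Int)) : Prop :=
  3 ≤ gift_list.length ∧ 3 ≤ (gift_list.getD 0 []).length ∧ 3 ≤ (gift_list.getD 1 []).length ∧
  2 ≤ (gift_list.getD 2 []).length ∧ 3 ≤ gift_pint.length ∧ 2 ≤ (gift_pint.getD 0 []).length ∧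
  2 ≤ (gift_pint.getD 1 []).length ∧ 2 ≤ (gift_pint.getD 2 []).length
instance (gift_list : List (List Int)) (gift_pint : List (List Int)) : Decidable (Pre_gift_count gift_list gift_pint) := by unfold Pre_gift_count; infer_instance

def pvWitness_gift_count : List (List Int) × List (List Int) :=
  ([[0, 5, 1], [3, 0, 2], [2, 2, 0]], [[5, 3], [4, 4], [1, 0]])

def Spec_gift_count (gift_list : List (List Int)) (gift_pint : List (List Int)) (out : List Int) : Prop := out = gift_count_alt gift_list gift_pint
instance (gift_list : List (List Int)) (gift_pint : List (List Int)) (out : List Int) : Decidable (Spec_gift_count gift_list gift_pint out) := by unfold Spec_gift_count; infer_instance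

-- ===== CLAIM (what is proved, stated in full; the proofs are below) =====
def Claim_equal_gift_count : Prop := ∀ (gift_list : List (List Int)) (gift_pint : List (List Int)), Dom_gift_count gift_list gift_pint → Pre_gift_count gift_list gift_pint → Spec_gift_count gift_list gift_pint (gift_count gift_list gift_pint)

-- ===== LEMMAS AND PROOFS =====

-- ===== VERDICT (by name: the statement is the Claim_ definition above) =====
-- win x y dj di = 1 iff the (x,dj) side beats the (y,di) side (proof-only helper)
def pvWin (x y dj di : Int) : Int := if x > y ∨ (x = y ∧ dj > di) then 1 else 0

-- one pair update of A's triangular pass, in component form (positions 0,1 / 0,2 / 1,2)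
lemma pairA01 (u v w x y dj di : Int) :
    (if x > y then PySem.List.pySetD [u, v, w] 0 (PySem.List.pyGetD [u, v, w] 0 0 + 1)
     else if x < y then PySem.List.pySetD [u, v, w] 1 (PySem.List.pyGetD [u, v, w] 1 0 + 1)
     else if x = y then
       (if dj > di then PySem.List.pySetD [u, v, w] 0 (PySem.List.pyGetD [u, v, w] 0 0 + 1)
        else if dj < di then PySem.List.pySetD [u, v, w] 1 (PySem.List.pyGetD [u, v, w] 1 0 + 1)
        else [u, v, w])
     else [u, v, w]) = [u + pvWin x y dj di, v + pvWin y x di dj, w] := by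
  have s0 : PySem.List.pySetD [u, v, w] 0 (PySem.List.pyGetD [u, v, w] 0 0 + 1) = [u + 1, v, w] := rfl
  have s1 : PySem.List.pySetD [u, v, w] 1 (PySem.List.pyGetD [u, v, w] 1 0 + 1) = [u, v + 1, w] := rfl
  rw [s0, s1]
  unfold pvWin
  split_ifs <;> simp_all <;> omega

lemma pairA02 (u v w x y dj di : Int) :
    (if x > y then PySem.List.pySetD [u, v, w] 0 (PySem.List.pyGetD [u, v, w] 0 0 + 1)
     else if x < y then PySem.List.pySetD [u, v, w] 2 (PySem.List.pyGetD [u, v, w] 2 0 + 1)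
     else if x = y then
       (if dj > di then PySem.List.pySetD [u, v, w] 0 (PySem.List.pyGetD [u, v, w] 0 0 + 1)
        else if dj < di then PySem.List.pySetD [u, v, w] 2 (PySem.List.pyGetD [u, v, w] 2 0 + 1)
        else [u, v, w])
     else [u, v, w]) = [u + pvWin x y dj di, v, w + pvWin y x di dj] := by
  have s0 : PySem.List.pySetD [u, v, w] 0 (PySem.List.pyGetD [u, v, w] 0 0 + 1) = [u + 1, v, w] := rfl
  have s2 : PySem.List.pySetD [u, v, w] 2 (PySem.List.pyGetD [u, v, w] 2 0 + 1) = [u, v, w + 1] := rfl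
  rw [s0, s2]
  unfold pvWin
  split_ifs <;> simp_all <;> omega

lemma pairA12 (u v w x y dj di : Int) :
    (if x > y then PySem.List.pySetD [u, v, w] 1 (PySem.List.pyGetD [u, v, w] 1 0 + 1)
     else if x < y then PySem.List.pySetD [u, v, w] 2 (PySem.List.pyGetD [u, v, w] 2 0 + 1)
     else if x = y then
       (if dj > di then PySem.List.pySetD [u, v, w] 1 (PySem.List.pyGetD [u, v, w] 1 0 + 1)
        else if dj < di then PySem.List.pySetD [u, v, w] 2 (PySem.List.pyGetD [u, v, w] 2 0 + 1)
        else [u, v, w])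
     else [u, v, w]) = [u, v + pvWin x y dj di, w + pvWin y x di dj] := by
  have s1 : PySem.List.pySetD [u, v, w] 1 (PySem.List.pyGetD [u, v, w] 1 0 + 1) = [u, v + 1, w] := rfl
  have s2 : PySem.List.pySetD [u, v, w] 2 (PySem.List.pyGetD [u, v, w] 2 0 + 1) = [u, v, w + 1] := rfl
  rw [s1, s2]
  unfold pvWin
  split_ifs <;> simp_all <;> omega

-- ===== VERDICT (by name: the statement is the Claim_ definition above) =====
theorem gift_count_spec : Claim_equal_gift_count := by
  intro gl gp _ hpre
  obtain ⟨h1, h2, h3, h4, h5, h6, h7, h8⟩ := hpre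
  match gl, gp with
  | (a01 :: a02 :: a03 :: _) :: (b01 :: b02 :: b03 :: _) :: (c01 :: c02 :: _) :: _,
    (p00 :: p01 :: _) :: (p10 :: p11 :: _) :: (p20 :: p21 :: _) :: _ =>
    show Spec_gift_count _ _ _
    have r03 : PySem.List.pyRange 0 3 1 = [0, 1, 2] := by decide
    have r13 : PySem.List.pyRange (0 + 1) 3 1 = [1, 2] := by decide
    have r23 : PySem.List.pyRange (1 + 1) 3 1 = [2] := by decide
    have r33 : PySem.List.pyRange (2 + 1) 3 1 = [] := by decide
    unfold Spec_gift_count gift_count gift_count_alt pvAt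
    simp only [r03, r13, r23, r33, List.foldl, List.map]
    rw [pairA01, pairA02, pairA12]
    norm_num [pvWin, PySem.List.pyGetD_ofNat', PySem.List.pyGetD_zero_cons,
      List.getD_cons_zero, List.getD_cons_succ]
    split_ifs <;> omega
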